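-- pv_equiv track=rewrite | github.com/Aiden0609/CMSC6950_F2025_Project_yunyud | computeSDI.py | detect_spells
-- ===== SOURCE A (Python) =====
-- def detect_spells(binary_arr):
--     """
--     Detect warm spells in a sequence of 0/1 values.
--     Here a simplified version is defined as:
--         >= 3 consecutive hot days (1)
--
--     :param binary_arr: list of integer 0/1
--     """
--     spells = []
--     start = None
--
--     for i, x in enumerate(binary_arr):
--         if x == 1:
--             if start is None:
--                 start = i  # potential start of a spell
--         else:
--             if start is not None and i - start >= 3:
--                 spells.append((start, i - 1))
--             start = None  # reset start
--
--     if start is not None and len(binary_arr) - start >= 3: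
--         spells.append((start, len(binary_arr) - 1))
--
--     return spells
-- ===== SOURCE B (Python) =====
-- def detect_spells(binary_arr):
--     """
--     Detect warm spells (>= 3 consecutive 1s) by jumping run-to-run with
--     two indices instead of tracking an Optional start pointer per element.
--     """
--     spells = []
--     n = len(binary_arr)
--     i = 0
--     while i < n:
--         if binary_arr[i] == 1:
--             j = i
--             while j < n and binary_arr[j] == 1:
--                 j += 1
--             if j - i >= 3:
--                 spells.append((i, j - 1))
--             i = j
--         else:
--             i += 1
--     return spells
-- ===== Notes on version B (the rewrite author's own statement) =====
-- stated objective: alternative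
-- what changed: Replaces the single enumerate pass with an Optional start pointer and a post-loop flush by a two-index run scanner that, on seeing a 1, scans the whole run at once, emits it if long enough, and jumps past it (no sentinel state, no final flush).
import Mathlib
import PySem

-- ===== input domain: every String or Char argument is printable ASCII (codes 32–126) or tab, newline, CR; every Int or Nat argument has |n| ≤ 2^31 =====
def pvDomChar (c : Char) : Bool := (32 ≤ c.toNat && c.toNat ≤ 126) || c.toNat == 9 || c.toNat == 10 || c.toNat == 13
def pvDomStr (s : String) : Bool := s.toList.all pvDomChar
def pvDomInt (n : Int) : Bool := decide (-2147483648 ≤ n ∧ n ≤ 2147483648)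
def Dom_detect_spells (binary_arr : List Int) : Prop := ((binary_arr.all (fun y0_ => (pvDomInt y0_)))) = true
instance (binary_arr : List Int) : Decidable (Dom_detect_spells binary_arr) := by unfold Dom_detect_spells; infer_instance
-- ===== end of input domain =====

-- B re-implements the run detection as a two-index run scanner (scan a whole run of 1s,
-- emit it if long enough, jump past it) instead of A's per-element Optional start pointer
-- with a post-loop flush; same O(n) cost, no speed claim.

-- ===== PORT A =====
-- loop body of A's `for i, x in enumerate(binary_arr)`
def stepA (st : List (Int × Int) × Option Int) (p : Int × Int) : List (Int × Int) × Option Int :=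
  if p.2 = 1 then
    match st.2 with
    | none => (st.1, some p.1)      -- start = i
    | some _ => st
  else
    match st.2 with
    | some s => ((if p.1 - s ≥ 3 then st.1 ++ [(s, p.1 - 1)] else st.1), none)
    | none => (st.1, none)

-- A's post-loop flush: `if start is not None and len(binary_arr) - start >= 3: …`
def finishA (n : Int) (st : List (Int × Int) × Option Int) : List (Int × Int) :=
  match st.2 with
  | some s => if n - s ≥ 3 then st.1 ++ [(s, n - 1)] else st.1
  | none => st.1

def detect_spells (binary_arr : List Int) : List (Int × Int) :=
  finishA (binary_arr.length : Int)
    ((PySem.List.enumerate binary_arr).foldl stepA ([], none))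

-- ===== PORT B =====
-- length of the leading run of 1s (B's inner `while j < n and binary_arr[j] == 1`)
def run1 : List Int → Nat
  | [] => 0
  | x :: xs => if x = 1 then run1 xs + 1 else 0

-- B's outer while loop: on a 1, measure the run, emit if ≥ 3, jump past it (i = j)
def detectGo (i : Int) : List Int → List (Int × Int)
  | [] => []
  | x :: xs =>
    if x = 1 then
      (if ((run1 xs : Int) + 1) ≥ 3 then [(i, i + ((run1 xs : Int) + 1) - 1)] else []) ++
        detectGo (i + ((run1 xs : Int) + 1)) (List.drop (run1 xs) xs)
    else
      detectGo (i + 1) xs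
termination_by l => l.length
decreasing_by
  · simp only [List.length_cons]; exact Nat.lt_succ_of_le (List.length_drop (l := xs) (i := run1 xs) ▸ Nat.sub_le _ _)
  · simp

def detect_spells_alt (binary_arr : List Int) : List (Int × Int) :=
  detectGo 0 binary_arr

-- ===== PRECONDITION & SPEC =====
def Spec_detect_spells (binary_arr : List Int) (out : List (Int × Int)) : Prop := out = detect_spells_alt binary_arr
instance (binary_arr : List Int) (out : List (Int × Int)) : Decidable (Spec_detect_spells binary_arr out) := by unfold Spec_detect_spells; infer_instance

-- ===== CLAIM (what is proved, stated in full; the proofs are below) =====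
def Claim_equal_detect_spells : Prop := ∀ (binary_arr : List Int), Dom_detect_spells binary_arr → Spec_detect_spells binary_arr (detect_spells binary_arr)

-- ===== LEMMAS AND PROOFS =====

-- evaluation of A's loop body in each of its four cases
lemma stepA_one_none (acc : List (Int × Int)) (i x : Int) (hx : x = 1) :
    stepA (acc, none) (i, x) = (acc, some i) := by simp [stepA, hx]

lemma stepA_one_some (acc : List (Int × Int)) (i s x : Int) (hx : x = 1) :
    stepA (acc, some s) (i, x) = (acc, some s) := by simp [stepA, hx]

lemma stepA_ne_none (acc : List (Int × Int)) (i x : Int) (hx : ¬ x = 1) :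
    stepA (acc, none) (i, x) = (acc, none) := by simp [stepA, hx]

lemma stepA_ne_some (acc : List (Int × Int)) (i s x : Int) (hx : ¬ x = 1) :
    stepA (acc, some s) (i, x) = ((if i - s ≥ 3 then acc ++ [(s, i - 1)] else acc), none) := by
  simp [stepA, hx]

-- pull the conditional append out of the accumulator
lemma ite_append_single (c : Prop) [Decidable c] (acc : List (Int × Int)) (p : Int × Int) :
    (if c then acc ++ [p] else acc) = acc ++ (if c then [p] else []) := by
  split_ifs <;> simp

-- The main invariant, both loop states at once, by strong induction on the list length:
--  * state `none` at absolute index i: the remaining fold+flush produces acc ++ detectGo i l;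
--  * state `some s` at absolute index i: the pending run started at s, and the fold+flush
--    first emits (s, i + run1 l - 1) iff i + run1 l - s ≥ 3, then continues past the run.
lemma loop_inv : ∀ (n : Nat) (l : List Int), l.length ≤ n →
    ((∀ (i : Int) (acc : List (Int × Int)),
        finishA (i + (l.length : Int)) ((PySem.List.enumerate l i).foldl stepA (acc, none))
          = acc ++ detectGo i l) ∧
     (∀ (i s : Int) (acc : List (Int × Int)),
        finishA (i + (l.length : Int)) ((PySem.List.enumerate l i).foldl stepA (acc, some s))
          = acc ++ ((if i + (run1 l : Int) - s ≥ 3 then [(s, i + (run1 l : Int) - 1)] else [])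
              ++ detectGo (i + (run1 l : Int)) (List.drop (run1 l) l)))) := by
  intro n
  induction n with
  | zero =>
    intro l hl
    have : l = [] := List.eq_nil_of_length_eq_zero (Nat.le_zero.mp hl)
    subst this
    constructor
    · intro i acc; simp [PySem.List.enumerate, finishA, detectGo]
    · intro i s acc; simp [PySem.List.enumerate, finishA, run1, detectGo, ite_append_single]
  | succ n ih =>
    intro l hl
    match l with
    | [] =>
      constructor
      · intro i acc; simp [PySem.List.enumerate, finishA, detectGo]
      · intro i s acc; simp [PySem.List.enumerate, finishA, run1, detectGo, ite_append_single]
    | x :: xs =>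
      have hxs : xs.length ≤ n := by simpa using hl
      have hlen : ∀ i : Int, i + ((x :: xs).length : Int) = (i + 1) + (xs.length : Int) := by
        intro i; push_cast [List.length_cons]; ring
      constructor
      · -- state none
        intro i acc
        by_cases hx : x = 1
        · -- a run starts here
          subst hx
          rw [PySem.List.enumerate_cons, List.foldl_cons, stepA_one_none acc i 1 rfl,
              hlen i, (ih xs hxs).2 (i + 1) i acc]
          simp only [detectGo]
          have h1 : i + 1 + (run1 xs : Int) - i = (run1 xs : Int) + 1 := by ring
          have h2 : i + 1 + (run1 xs : Int) - 1 = i + ((run1 xs : Int) + 1) - 1 := by ring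
          have h3 : i + 1 + (run1 xs : Int) = i + ((run1 xs : Int) + 1) := by ring
          rw [h1, h2, h3]
          simp
        · -- not a 1: nothing pending, move on
          rw [PySem.List.enumerate_cons, List.foldl_cons, stepA_ne_none acc i x hx,
              hlen i, (ih xs hxs).1 (i + 1) acc]
          simp [detectGo, hx]
      · -- state some s
        intro i s acc
        by_cases hx : x = 1
        · -- run continues
          subst hx
          rw [PySem.List.enumerate_cons, List.foldl_cons, stepA_one_some acc i s 1 rfl,
              hlen i, (ih xs hxs).2 (i + 1) s acc]
          have hr : run1 (1 :: xs) = run1 xs + 1 := by simp [run1]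
          rw [hr, List.drop_succ_cons]
          have h1 : i + ((run1 xs + 1 : Nat) : Int) = i + 1 + (run1 xs : Int) := by push_cast; ring
          rw [h1]
        · -- run ends here: flush (maybe emit), reset to none
          rw [PySem.List.enumerate_cons, List.foldl_cons, stepA_ne_some acc i s x hx,
              hlen i, (ih xs hxs).1 (i + 1) (if i - s ≥ 3 then acc ++ [(s, i - 1)] else acc),
              ite_append_single, List.append_assoc]
          have hr : run1 (x :: xs) = 0 := by simp [run1, hx]
          rw [hr]
          simp [detectGo, hx]

-- ===== VERDICT (by name: the statement is the Claim_ definition above) =====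
theorem detect_spells_spec : Claim_equal_detect_spells := by
  intro l _
  unfold Spec_detect_spells detect_spells detect_spells_alt
  have := (loop_inv l.length l le_rfl).1 0 []
  simpa using this
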